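-- pv_equiv track=rewrite | github.com/God-Gamer-Manyu/Tools_in_datascience_iitm | Week 6/process_data.py | get_canonical_region
-- ===== SOURCE A (Python) =====
-- REGIONS = [
--     {"canonical": "North America", "variants": ["NorthAmerica", "N. America", "N America", "North-Am"]},
--     {"canonical": "Latin America", "variants": ["LatAm", "Latin-America", "LAT AM", "LatinAmerica"]},
--     {"canonical": "Europe", "variants": ["EU", "Europa", "Europe Region", "E.U."]},
--     {"canonical": "Middle East & Africa", "variants": ["MEA", "MiddleEast&Africa", "M. East Africa", "Middle East/Africa"]},
--     {"canonical": "Asia Pacific", "variants": ["APAC", "Asia-Pacific", "AsiaPac", "Asia Pacific Region"]}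
-- ]
--
-- def get_canonical_region(value):
--     """Finds the canonical region name from a variant."""
--     if not isinstance(value, str):
--         return None
--     val_norm = value.strip().lower()
--     for region in REGIONS:
--         if val_norm == region["canonical"].lower():
--             return region["canonical"]
--         for variant in region["variants"]:
--             if val_norm == variant.lower():
--                 return region["canonical"]
--     return None
-- ===== SOURCE B (Python) =====
-- REGIONS = [
--     {"canonical": "North America", "variants": ["NorthAmerica", "N. America", "N America", "North-Am"]},
--     {"canonical": "Latin America", "variants": ["LatAm", "Latin-America", "LAT AM", "LatinAmerica"]},
--     {"canonical": "Europe", "variants": ["EU", "Europa", "Europe Region", "E.U."]},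
--     {"canonical": "Middle East & Africa", "variants": ["MEA", "MiddleEast&Africa", "M. East Africa", "Middle East/Africa"]},
--     {"canonical": "Asia Pacific", "variants": ["APAC", "Asia-Pacific", "AsiaPac", "Asia Pacific Region"]}
-- ]
--
-- LOOKUP = {
--     key.lower(): region["canonical"]
--     for region in REGIONS
--     for key in [region["canonical"], *region["variants"]]
-- }
--
-- def get_canonical_region(value):
--     """Finds the canonical region name from a variant."""
--     if not isinstance(value, str):
--         return None
--     return LOOKUP.get(value.strip().lower())
-- ===== Notes on version B (the rewrite author's own statement) =====
-- stated objective: idiomatic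
-- what changed: Replaced A's nested scan loops over REGIONS with a lowercased-key dict built once at module load and a single .get() lookup per call.
import Mathlib
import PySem

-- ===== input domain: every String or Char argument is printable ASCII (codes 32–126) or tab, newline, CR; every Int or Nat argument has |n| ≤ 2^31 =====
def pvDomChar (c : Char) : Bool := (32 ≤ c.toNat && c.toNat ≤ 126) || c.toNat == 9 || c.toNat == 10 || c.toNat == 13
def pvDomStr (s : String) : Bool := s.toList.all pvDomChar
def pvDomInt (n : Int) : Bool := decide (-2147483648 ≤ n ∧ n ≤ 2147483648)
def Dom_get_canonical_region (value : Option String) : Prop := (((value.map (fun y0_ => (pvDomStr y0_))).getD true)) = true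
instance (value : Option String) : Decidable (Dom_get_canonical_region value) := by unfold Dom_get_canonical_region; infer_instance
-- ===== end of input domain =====

-- B replaces A's two nested scan loops by a dict built once at module load and a single lookup (objective: idiomatic).

-- shared module data: REGIONS, each entry (canonical, variants)
def REGIONS : List (String × List String) :=
  [ ("North America", ["NorthAmerica", "N. America", "N America", "North-Am"]),
    ("Latin America", ["LatAm", "Latin-America", "LAT AM", "LatinAmerica"]),
    ("Europe", ["EU", "Europa", "Europe Region", "E.U."]),
    ("Middle East & Africa", ["MEA", "MiddleEast&Africa", "M. East Africa", "Middle East/Africa"]),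
    ("Asia Pacific", ["APAC", "Asia-Pacific", "AsiaPac", "Asia Pacific Region"]) ]

-- ===== PORT A =====
-- inner loop: for variant in region["variants"]: if val_norm == variant.lower(): return region["canonical"]
def scanVariantsA (canon : String) (valNorm : String) : List String → Option String
  | [] => none
  | v :: rest =>
    if valNorm == PySem.Str.lower v then some canon else scanVariantsA canon valNorm rest

-- outer loop: for region in REGIONS: …
def scanRegionsA (valNorm : String) : List (String × List String) → Option String
  | [] => none
  | (canon, variants) :: rest =>
    if valNorm == PySem.Str.lower canon then some canon
    else
      match scanVariantsA canon valNorm variants with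
      | some r => some r
      | none => scanRegionsA valNorm rest

def get_canonical_region (value : Option String) : Option String :=
  match value with
  | none => none      -- not isinstance(value, str)
  | some s => scanRegionsA (PySem.Str.lower (PySem.Str.strip s)) REGIONS

-- ===== PORT B =====
-- LOOKUP = {key.lower(): canonical for (canonical, variants) in REGIONS for key in [canonical, *variants]}
def LOOKUP : PySem.Dict String String :=
  REGIONS.foldl
    (fun d p =>
      (p.1 :: p.2).foldl (fun d' key => d'.insert (PySem.Str.lower key) p.1) d)
    PySem.Dict.empty

def get_canonical_region_alt (value : Option String) : Option String :=
  match value with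
  | none => none      -- not isinstance(value, str)
  | some s => LOOKUP.get? (PySem.Str.lower (PySem.Str.strip s))

-- ===== PRECONDITION & SPEC =====
def Spec_get_canonical_region (value : Option String) (out : Option String) : Prop := out = get_canonical_region_alt value
instance (value : Option String) (out : Option String) : Decidable (Spec_get_canonical_region value out) := by unfold Spec_get_canonical_region; infer_instance

-- ===== CLAIM (what is proved, stated in full; the proofs are below) =====
def Claim_equal_get_canonical_region : Prop := ∀ (value : Option String), Dom_get_canonical_region value → Spec_get_canonical_region value (get_canonical_region value)

-- ===== LEMMAS AND PROOFS =====

-- LOOKUP evaluated as a literal association dict (the comprehension over REGIONS, run once)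
set_option maxHeartbeats 2000000 in
theorem lookup_items : LOOKUP = PySem.Dict.mk [("north america", "North America"), ("northamerica", "North America"), ("n. america", "North America"), ("n america", "North America"), ("north-am", "North America"), ("latin america", "Latin America"), ("latam", "Latin America"), ("latin-america", "Latin America"), ("lat am", "Latin America"), ("latinamerica", "Latin America"), ("europe", "Europe"), ("eu", "Europe"), ("europa", "Europe"), ("europe region", "Europe"), ("e.u.", "Europe"), ("middle east & africa", "Middle East & Africa"), ("mea", "Middle East & Africa"), ("middleeast&africa", "Middle East & Africa"), ("m. east africa", "Middle East & Africa"), ("middle east/africa", "Middle East & Africa"), ("asia pacific", "Asia Pacific"), ("apac", "Asia Pacific"), ("asia-pacific", "Asia Pacific"), ("asiapac", "Asia Pacific"), ("asia pacific region", "Asia Pacific")] := by decide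

-- A's scan over the concrete REGIONS agrees with B's dict lookup, for every key string
set_option maxHeartbeats 2000000 in
set_option maxRecDepth 8192 in
theorem scan_eq_lookup (v : String) : scanRegionsA v REGIONS = LOOKUP.get? v := by
  rw [lookup_items]
  by_cases h0 : v = "north america"
  · subst h0; decide
  by_cases h1 : v = "northamerica"
  · subst h1; decide
  by_cases h2 : v = "n. america"
  · subst h2; decide
  by_cases h3 : v = "n america"
  · subst h3; decide
  by_cases h4 : v = "north-am"
  · subst h4; decide
  by_cases h5 : v = "latin america"
  · subst h5; decide
  by_cases h6 : v = "latam"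
  · subst h6; decide
  by_cases h7 : v = "latin-america"
  · subst h7; decide
  by_cases h8 : v = "lat am"
  · subst h8; decide
  by_cases h9 : v = "latinamerica"
  · subst h9; decide
  by_cases h10 : v = "europe"
  · subst h10; decide
  by_cases h11 : v = "eu"
  · subst h11; decide
  by_cases h12 : v = "europa"
  · subst h12; decide
  by_cases h13 : v = "europe region"
  · subst h13; decide
  by_cases h14 : v = "e.u."
  · subst h14; decide
  by_cases h15 : v = "middle east & africa"
  · subst h15; decide
  by_cases h16 : v = "mea"
  · subst h16; decide
  by_cases h17 : v = "middleeast&africa"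
  · subst h17; decide
  by_cases h18 : v = "m. east africa"
  · subst h18; decide
  by_cases h19 : v = "middle east/africa"
  · subst h19; decide
  by_cases h20 : v = "asia pacific"
  · subst h20; decide
  by_cases h21 : v = "apac"
  · subst h21; decide
  by_cases h22 : v = "asia-pacific"
  · subst h22; decide
  by_cases h23 : v = "asiapac"
  · subst h23; decide
  by_cases h24 : v = "asia pacific region"
  · subst h24; decide
  simp only [scanRegionsA, scanVariantsA, REGIONS, PySem.Dict.get?_mk_cons,
    show PySem.Str.lower "North America" = "north america" from by decide,
    show PySem.Str.lower "NorthAmerica" = "northamerica" from by decide,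
    show PySem.Str.lower "N. America" = "n. america" from by decide,
    show PySem.Str.lower "N America" = "n america" from by decide,
    show PySem.Str.lower "North-Am" = "north-am" from by decide,
    show PySem.Str.lower "Latin America" = "latin america" from by decide,
    show PySem.Str.lower "LatAm" = "latam" from by decide,
    show PySem.Str.lower "Latin-America" = "latin-america" from by decide,
    show PySem.Str.lower "LAT AM" = "lat am" from by decide,
    show PySem.Str.lower "LatinAmerica" = "latinamerica" from by decide,
    show PySem.Str.lower "Europe" = "europe" from by decide,
    show PySem.Str.lower "EU" = "eu" from by decide,
    show PySem.Str.lower "Europa" = "europa" from by decide,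
    show PySem.Str.lower "Europe Region" = "europe region" from by decide,
    show PySem.Str.lower "E.U." = "e.u." from by decide,
    show PySem.Str.lower "Middle East & Africa" = "middle east & africa" from by decide,
    show PySem.Str.lower "MEA" = "mea" from by decide,
    show PySem.Str.lower "MiddleEast&Africa" = "middleeast&africa" from by decide,
    show PySem.Str.lower "M. East Africa" = "m. east africa" from by decide,
    show PySem.Str.lower "Middle East/Africa" = "middle east/africa" from by decide,
    show PySem.Str.lower "Asia Pacific" = "asia pacific" from by decide,
    show PySem.Str.lower "APAC" = "apac" from by decide,
    show PySem.Str.lower "Asia-Pacific" = "asia-pacific" from by decide,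
    show PySem.Str.lower "AsiaPac" = "asiapac" from by decide,
    show PySem.Str.lower "Asia Pacific Region" = "asia pacific region" from by decide]
  simp [PySem.Dict.get?, h0, h1, h2, h3, h4, h5, h6, h7, h8, h9, h10, h11, h12, h13, h14, h15, h16, h17, h18, h19, h20, h21, h22, h23, h24, Ne.symm h0, Ne.symm h1, Ne.symm h2, Ne.symm h3, Ne.symm h4, Ne.symm h5, Ne.symm h6, Ne.symm h7, Ne.symm h8, Ne.symm h9, Ne.symm h10, Ne.symm h11, Ne.symm h12, Ne.symm h13, Ne.symm h14, Ne.symm h15, Ne.symm h16, Ne.symm h17, Ne.symm h18, Ne.symm h19, Ne.symm h20, Ne.symm h21, Ne.symm h22, Ne.symm h23, Ne.symm h24]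

-- ===== VERDICT (by name: the statement is the Claim_ definition above) =====
theorem get_canonical_region_spec : Claim_equal_get_canonical_region := by
  intro value _
  unfold Spec_get_canonical_region get_canonical_region get_canonical_region_alt
  cases value with
  | none => rfl
  | some s => exact scan_eq_lookup _
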